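-- pv_equiv track=rewrite | github.com/lessneek/paraproxio | paraproxio.py | get_bytes_ranges_by_parts
-- ===== SOURCE A (Python) =====
-- from typing import Tuple, Callable, Optional, List, Set, Dict, Any
--
-- def get_bytes_ranges_by_parts(length: int, parts: int) -> List[Tuple[int, int]]:
--     """ Get bytes ranges """
--     ###################################################################################################
--     #
--     # length            = 89
--     # parts             = 5
--     # range_size        = length // parts = 89 // 5 = 17
--     # last_range_size   = range_size + length % parts = 17 + 89 % 5 = 17 + 4 = 21
--     #
--     # [<--range_size--->|<--range_size--->|<--range_size--->|<--range_size--->|<--last_range_size--->|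
--     # [*****************|*****************|*****************|*****************|*****************|****]
--     # 0                 17                34                51                68                85   89
--     #
--     ###################################################################################################
--     range_size = length // parts
--     last_range_size = range_size + length % parts
--     last_range_idx = parts - 1
--     bytes_ranges = []
--     for part in range(0, last_range_idx):
--         bytes_range = (part * range_size, ((part + 1) * range_size) - 1)
--         bytes_ranges.append(bytes_range)
--     last_range_offset = last_range_idx * range_size
--     bytes_ranges.append((last_range_offset, last_range_offset + last_range_size - 1))
--     return bytes_ranges
-- ===== SOURCE B (Python) =====
-- def get_bytes_ranges_by_parts(length: int, parts: int):
--     """Get bytes ranges, built back-to-front.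
--
--     Start with the last range (which absorbs the remainder), then repeatedly
--     derive the previous range from the current one's start offset by stepping
--     back range_size bytes; finally reverse the accumulated list.
--     """
--     range_size = length // parts
--     out = [((parts - 1) * range_size, length - 1)]  # last range, remainder included
--     for _ in range(parts - 1):
--         start, _end = out[-1]
--         out.append((start - range_size, start - 1))
--     out.reverse()
--     return out
-- ===== Notes on version B (the rewrite author's own statement) =====
-- stated objective: alternative
-- what changed: B builds the result back-to-front: it emits the remainder-absorbing last range first, derives each earlier range from the previous one's start offset by stepping back range_size, and reverses at the end, instead of A's forward index loop with a special-cased final append.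
import Mathlib
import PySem

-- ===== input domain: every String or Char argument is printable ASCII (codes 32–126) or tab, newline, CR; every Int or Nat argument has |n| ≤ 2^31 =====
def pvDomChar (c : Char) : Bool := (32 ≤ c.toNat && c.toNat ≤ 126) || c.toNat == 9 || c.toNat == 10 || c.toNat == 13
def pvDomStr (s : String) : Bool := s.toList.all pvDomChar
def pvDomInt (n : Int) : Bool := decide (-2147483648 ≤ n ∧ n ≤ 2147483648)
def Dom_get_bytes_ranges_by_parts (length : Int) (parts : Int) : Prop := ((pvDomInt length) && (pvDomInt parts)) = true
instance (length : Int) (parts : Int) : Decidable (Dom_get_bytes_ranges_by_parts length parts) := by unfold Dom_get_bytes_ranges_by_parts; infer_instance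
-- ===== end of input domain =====

-- B builds the result back-to-front (last, remainder-absorbing range first, each earlier range
-- derived from the previous one's start by stepping back range_size, then a reverse); objective:
-- alternative.

-- ===== PORT A =====
def get_bytes_ranges_by_parts (length : Int) (parts : Int) : List (Int × Int) :=
  let range_size := PySem.Int.floordiv length parts
  let last_range_size := range_size + PySem.Int.mod length parts
  let last_range_idx := parts - 1
  let bytes_ranges := (PySem.List.pyRange 0 last_range_idx 1).foldl
    (fun acc part => acc ++ [(part * range_size, ((part + 1) * range_size) - 1)]) []
  let last_range_offset := last_range_idx * range_size
  bytes_ranges ++ [(last_range_offset, last_range_offset + last_range_size - 1)]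

-- ===== PORT B =====
def get_bytes_ranges_by_parts_alt (length : Int) (parts : Int) : List (Int × Int) :=
  let range_size := PySem.Int.floordiv length parts
  let out0 : List (Int × Int) := [((parts - 1) * range_size, length - 1)]
  let out := (PySem.List.pyRange 0 (parts - 1) 1).foldl
    (fun (out : List (Int × Int)) (_ : Int) =>
      match PySem.List.pyGet? out (-1) with   -- out[-1]; out is never empty, none unreachable
      | some se => out ++ [(se.1 - range_size, se.1 - 1)]
      | none => out) out0
  out.reverse

-- ===== PRECONDITION & SPEC =====
-- Pre_ excludes exactly parts = 0, where A (and B alike) raises ZeroDivisionError at `length // parts`.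
def Pre_get_bytes_ranges_by_parts (length : Int) (parts : Int) : Prop := parts ≠ 0
instance (length : Int) (parts : Int) : Decidable (Pre_get_bytes_ranges_by_parts length parts) := by unfold Pre_get_bytes_ranges_by_parts; infer_instance
def pvWitness_get_bytes_ranges_by_parts : Int × Int := (89, 5)
def Spec_get_bytes_ranges_by_parts (length : Int) (parts : Int) (out : List (Int × Int)) : Prop := out = get_bytes_ranges_by_parts_alt length parts
instance (length : Int) (parts : Int) (out : List (Int × Int)) : Decidable (Spec_get_bytes_ranges_by_parts length parts out) := by unfold Spec_get_bytes_ranges_by_parts; infer_instance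

-- ===== CLAIM (what is proved, stated in full; the proofs are below) =====
def Claim_equal_get_bytes_ranges_by_parts : Prop := ∀ (length : Int) (parts : Int), Dom_get_bytes_ranges_by_parts length parts → Pre_get_bytes_ranges_by_parts length parts → Spec_get_bytes_ranges_by_parts length parts (get_bytes_ranges_by_parts length parts)

-- ===== LEMMAS AND PROOFS =====

-- B's loop invariant: after m iterations starting from a list ending in (s, e), the list is the
-- initial one followed by the m back-stepped ranges g 0, g 1, …, g (m-1).
lemma B_loop (rs s e : Int) (xs : List (Int × Int)) (m : Nat) :
    (PySem.List.pyRange 0 (m : Int) 1).foldl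
      (fun (out : List (Int × Int)) (_ : Int) =>
        match PySem.List.pyGet? out (-1) with
        | some se => out ++ [(se.1 - rs, se.1 - 1)]
        | none => out) (xs ++ [(s, e)])
    = (xs ++ [(s, e)]) ++
        (List.range m).map (fun (i : Nat) => (s - ((i : Int) + 1) * rs, s - (i : Int) * rs - 1)) := by
  induction m with
  | zero => simp [PySem.List.pyRange_one_eq_nil]
  | succ m ih =>
    rw [show ((m + 1 : Nat) : Int) = (m : Int) + 1 by push_cast; ring,
      PySem.List.pyRange_one_succ_right (by positivity), List.foldl_append, ih]
    cases m with
    | zero => simp [PySem.List.pyGet?_neg_one]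
    | succ k =>
      simp only [List.range_succ, List.map_append, List.map_cons, List.map_nil,
        List.foldl_cons, List.foldl_nil, ← List.append_assoc]
      rw [PySem.List.pyGet?_neg_one_append_singleton]
      have : (s - ((k : Int) + 1) * rs - rs, s - ((k : Int) + 1) * rs - 1)
          = (s - (((k + 1 : Nat) : Int) + 1) * rs, s - ((k + 1 : Nat) : Int) * rs - 1) := by
        simp only [Prod.mk.injEq]; push_cast; refine ⟨by ring, by ring⟩
      simp [this]

-- Reversal of the back-stepped list is exactly A's forward list of regular ranges.
lemma rev_map (rs : Int) (n : Nat) :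
    ((List.range n).map
        (fun (i : Nat) => ((n : Int) * rs - ((i : Int) + 1) * rs, (n : Int) * rs - (i : Int) * rs - 1))).reverse
    = (List.range n).map (fun (k : Nat) => ((k : Int) * rs, ((k : Int) + 1) * rs - 1)) := by
  apply List.ext_getElem
  · simp
  · intro i h1 h2
    simp only [List.length_reverse, List.length_map, List.length_range] at h1 h2
    rw [List.getElem_reverse]
    simp only [List.getElem_map, List.getElem_range, List.length_map, List.length_range]
    have hi : ((n - 1 - i : Nat) : Int) = (n : Int) - 1 - (i : Int) := by
      omega
    rw [hi]
    simp only [Prod.mk.injEq]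
    constructor <;> ring

-- ===== VERDICT (by name: the statement is the Claim_ definition above) =====
theorem get_bytes_ranges_by_parts_spec : Claim_equal_get_bytes_ranges_by_parts := by
  intro length parts _ h
  unfold Pre_get_bytes_ranges_by_parts at h
  unfold Spec_get_bytes_ranges_by_parts
  unfold get_bytes_ranges_by_parts get_bytes_ranges_by_parts_alt
  dsimp only
  set rs := PySem.Int.floordiv length parts with hrs
  have hdm : rs * parts + PySem.Int.mod length parts = length :=
    PySem.Int.floordiv_mul_add_mod length parts
  have hlast : (parts - 1) * rs + (rs + PySem.Int.mod length parts) - 1 = length - 1 := by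
    linear_combination hdm
  rcases le_or_gt parts 0 with hp | hp
  · -- parts ≤ -1: both loops are empty, single range [(parts-1)*rs, length-1]
    rw [PySem.List.pyRange_one_eq_nil (by omega)]
    simp [hlast]
  · -- parts ≥ 1
    obtain ⟨n, hn⟩ : ∃ n : Nat, parts - 1 = (n : Int) :=
      ⟨(parts - 1).toNat, (Int.toNat_of_nonneg (by omega)).symm⟩
    rw [hn] at hlast
    rw [hn, PySem.List.foldl_append_singleton_eq_map,
      show ([(((n : Int)) * rs, length - 1)] : List (Int × Int))
        = [] ++ [(((n : Int)) * rs, length - 1)] from rfl,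
      B_loop rs ((n : Int) * rs) (length - 1) [] n,
      PySem.List.pyRange_zero_natCast, List.map_map]
    simp only [List.nil_append, List.reverse_append, List.reverse_cons, List.reverse_nil,
      List.nil_append]
    rw [rev_map rs n, hlast]
    simp [Function.comp]
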